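-- pv_equiv track=rewrite | github.com/GBinion2020/Phishing-Agent | Investigation_Agent/investigation_pipeline.py | _dedupe_updates
-- ===== SOURCE A (Python) =====
-- from typing import Any, Callable
--
-- def _dedupe_updates(updates: list[dict[str, Any]]) -> list[dict[str, Any]]:
--     latest: dict[str, dict[str, Any]] = {}
--     rank = {"true": 3, "false": 2, "unknown": 1}
--     for up in updates:
--         sid = up["signal_id"]
--         prev = latest.get(sid)
--         if prev is None:
--             latest[sid] = up
--             continue
--         prev_rank = rank.get(str(prev.get("value", "unknown")), 0)
--         new_rank = rank.get(str(up.get("value", "unknown")), 0)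
--         if new_rank >= prev_rank:
--             latest[sid] = up
--     return list(latest.values())
-- ===== SOURCE B (Python) =====
-- def _dedupe_updates(updates):
--     rank = {"true": 3, "false": 2, "unknown": 1}
--
--     def rank_of(up):
--         return rank.get(str(up.get("value", "unknown")), 0)
--
--     groups = {}
--     for up in updates:
--         groups.setdefault(up["signal_id"], []).append(up)
--     result = []
--     for group in groups.values():
--         best = group[0]
--         for up in group[1:]:
--             if rank_of(up) >= rank_of(best):
--                 best = up
--         result.append(best)
--     return result
-- ===== Notes on version B (the rewrite author's own statement) =====
-- stated objective: alternative
-- what changed: B first groups all updates by signal_id into lists (setdefault/append), then reduces each group independently to its last rank-maximal element, instead of A's single pass that interleaves dict maintenance with rank comparisons against the stored winner; Pre_ excludes updates lacking the 'signal_id' key, on which both A and B raise KeyError.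
import Mathlib
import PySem

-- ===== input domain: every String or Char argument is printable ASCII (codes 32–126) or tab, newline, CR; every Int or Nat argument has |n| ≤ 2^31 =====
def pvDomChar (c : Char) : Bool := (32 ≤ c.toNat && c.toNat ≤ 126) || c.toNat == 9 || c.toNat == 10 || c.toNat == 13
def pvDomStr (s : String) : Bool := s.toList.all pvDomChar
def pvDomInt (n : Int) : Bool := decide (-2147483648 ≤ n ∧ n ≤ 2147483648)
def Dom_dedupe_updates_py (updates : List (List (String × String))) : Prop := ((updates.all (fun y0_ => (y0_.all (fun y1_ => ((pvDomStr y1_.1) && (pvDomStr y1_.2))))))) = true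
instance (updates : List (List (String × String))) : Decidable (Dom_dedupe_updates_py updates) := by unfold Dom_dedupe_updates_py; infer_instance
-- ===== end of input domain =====

-- B groups updates by signal_id and then reduces each group to its last rank-maximal
-- element, instead of A's interleaved winner-dict pass (objective: alternative).
-- Equivalence is about the return value; neither program mutates its argument.

-- ===== PORT A =====
-- up.get(k, dflt) on an update dict (assoc list, first match)
def pvGetD (up : List (String × String)) (k dflt : String) : String :=
  (PySem.Dict.mk up).getD k dflt

-- rank = {"true": 3, "false": 2, "unknown": 1}
def pvRank : PySem.Dict String Int :=
  PySem.Dict.mk [("true", 3), ("false", 2), ("unknown", 1)]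

-- Literal port of A. up["signal_id"] raises KeyError when the key is missing;
-- Pre_ excludes those inputs, the port reads the default "" there.
def dedupe_updates_py (updates : List (List (String × String))) : List (List (String × String)) :=
  (updates.foldl
    (fun latest up =>
      let sid := pvGetD up "signal_id" ""
      match latest.get? sid with
      | none => latest.insert sid up
      | some prev =>
        let prevRank := pvRank.getD (pvGetD prev "value" "unknown") 0
        let newRank := pvRank.getD (pvGetD up "value" "unknown") 0
        if prevRank ≤ newRank then latest.insert sid up else latest)
    PySem.Dict.empty).values

-- ===== PORT B =====
def pvRankOf (up : List (String × String)) : Int :=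
  pvRank.getD (pvGetD up "value" "unknown") 0

-- best = group[0]; for up in group[1:]: if rank_of(up) >= rank_of(best): best = up
def pvBest (group : List (List (String × String))) : List (String × String) :=
  match group with
  | [] => []   -- unreachable: every group is built nonempty
  | b :: rest => rest.foldl (fun best u => if pvRankOf best ≤ pvRankOf u then u else best) b

def dedupe_updates_py_alt (updates : List (List (String × String))) : List (List (String × String)) :=
  let groups : PySem.Dict String (List (List (String × String))) :=
    updates.foldl (fun g up => g.modify (pvGetD up "signal_id" "") [] (· ++ [up])) PySem.Dict.empty
  groups.items.foldl (fun res p => res ++ [pvBest p.2]) []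

-- ===== PRECONDITION & SPEC =====
-- Pre_ excludes exactly the inputs on which Python A raises KeyError:
-- some update dict has no "signal_id" key.
def Pre_dedupe_updates_py (updates : List (List (String × String))) : Prop :=
  (updates.all (fun up => (PySem.Dict.mk up).contains "signal_id")) = true
instance (updates : List (List (String × String))) : Decidable (Pre_dedupe_updates_py updates) := by
  unfold Pre_dedupe_updates_py; infer_instance

def pvWitness_dedupe_updates_py : (List (List (String × String))) :=
  [[("signal_id", "a"), ("value", "true")], [("signal_id", "a"), ("value", "false")]]

def Spec_dedupe_updates_py (updates : List (List (String × String))) (out : List (List (String × String))) : Prop := out = dedupe_updates_py_alt updates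
instance (updates : List (List (String × String))) (out : List (List (String × String))) : Decidable (Spec_dedupe_updates_py updates out) := by unfold Spec_dedupe_updates_py; infer_instance

-- ===== CLAIM (what is proved, stated in full; the proofs are below) =====
def Claim_equal_dedupe_updates_py : Prop := ∀ (updates : List (List (String × String))), Dom_dedupe_updates_py updates → Pre_dedupe_updates_py updates → Spec_dedupe_updates_py updates (dedupe_updates_py updates)

-- ===== LEMMAS AND PROOFS =====

-- the loop bodies, named for the proofs
def pvStepA (latest : PySem.Dict String (List (String × String))) (up : List (String × String)) :
    PySem.Dict String (List (String × String)) :=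
  let sid := pvGetD up "signal_id" ""
  match latest.get? sid with
  | none => latest.insert sid up
  | some prev =>
    let prevRank := pvRank.getD (pvGetD prev "value" "unknown") 0
    let newRank := pvRank.getD (pvGetD up "value" "unknown") 0
    if prevRank ≤ newRank then latest.insert sid up else latest

def pvStepB (g : PySem.Dict String (List (List (String × String)))) (up : List (String × String)) :
    PySem.Dict String (List (List (String × String))) :=
  g.modify (pvGetD up "signal_id" "") [] (· ++ [up])

-- the relation maintained between A's dict and B's dict
def pvRel (dA : PySem.Dict String (List (String × String)))
    (dB : PySem.Dict String (List (List (String × String)))) : Prop :=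
  dA.keys = dB.keys ∧ dB.keys.Nodup ∧
    ∀ k, k ∈ dB.keys → dB.getD k [] ≠ [] ∧ dA.getD k [] = pvBest (dB.getD k [])

theorem pvBest_append (b : List (String × String)) (rest : List (List (String × String)))
    (up : List (String × String)) :
    pvBest ((b :: rest) ++ [up]) =
      if pvRankOf (pvBest (b :: rest)) ≤ pvRankOf up then up else pvBest (b :: rest) := by
  simp [pvBest, List.foldl_append]

theorem get?_eq_some_getD {κ ν : Type} [BEq κ] [LawfulBEq κ] (d : PySem.Dict κ ν) (k : κ) (d0 : ν)
    (hk : k ∈ d.keys) : d.get? k = some (d.getD k d0) := by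
  have hc : d.contains k = true := (PySem.Dict.contains_iff_mem_keys d k).mpr hk
  rw [PySem.Dict.contains_eq_isSome_get?] at hc
  obtain ⟨v, hv⟩ := Option.isSome_iff_exists.mp hc
  rw [hv, PySem.Dict.getD_of_get?_eq_some d d0 hv]

theorem rel_step (dA : PySem.Dict String (List (String × String)))
    (dB : PySem.Dict String (List (List (String × String)))) (up : List (String × String))
    (h : pvRel dA dB) : pvRel (pvStepA dA up) (pvStepB dB up) := by
  obtain ⟨hkeys, hnd, hvals⟩ := h
  set k := pvGetD up "signal_id" "" with hkdef
  by_cases hk : k ∈ dB.keys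
  · -- existing key
    obtain ⟨hne, hbest⟩ := hvals k hk
    have hkA : k ∈ dA.keys := hkeys ▸ hk
    have hget : dA.get? k = some (dA.getD k []) := get?_eq_some_getD dA k [] hkA
    have hcB : dB.contains k = true := (PySem.Dict.contains_iff_mem_keys dB k).mpr hk
    have hmk : (pvStepB dB up).keys = dB.keys := by
      rw [pvStepB, PySem.Dict.keys_modify, PySem.Dict.keys_insert_of_contains _ _ hcB]
    obtain ⟨b, rest, hg⟩ : ∃ b rest, dB.getD k [] = b :: rest := by
      cases hgl : dB.getD k [] with
      | nil => exact absurd hgl hne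
      | cons b rest => exact ⟨b, rest, rfl⟩
    have hBgetD : (pvStepB dB up).getD k [] = dB.getD k [] ++ [up] :=
      PySem.Dict.getD_modify_self dB k [] (· ++ [up])
    have hbestnew : pvBest ((pvStepB dB up).getD k []) =
        if pvRankOf (pvBest (dB.getD k [])) ≤ pvRankOf up then up else pvBest (dB.getD k []) := by
      rw [hBgetD, hg, pvBest_append]
    have hstepA : pvStepA dA up =
        if pvRankOf (dA.getD k []) ≤ pvRankOf up then dA.insert k up else dA := by
      rw [pvStepA, ← hkdef, hget]
      simp only [pvRankOf]
      rfl
    by_cases hcond : pvRankOf (pvBest (dB.getD k [])) ≤ pvRankOf up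
    · have hcond' : pvRankOf (dA.getD k []) ≤ pvRankOf up := hbest ▸ hcond
      rw [hstepA, if_pos hcond']
      have hcA : dA.contains k = true := (PySem.Dict.contains_iff_mem_keys dA k).mpr hkA
      refine ⟨?_, hmk ▸ hnd, ?_⟩
      · rw [PySem.Dict.keys_insert_of_contains _ _ hcA, hmk, hkeys]
      · intro k' hk'
        rw [hmk] at hk'
        by_cases hkk : k' = k
        · subst hkk
          rw [hbestnew, if_pos hcond, hBgetD, PySem.Dict.getD_insert_self]
          exact ⟨by simp [hg], rfl⟩
        · rw [PySem.Dict.getD_insert_of_ne _ _ _ hkk,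
            pvStepB, PySem.Dict.getD_modify_of_ne _ _ _ hkk]
          exact hvals k' hk'
    · have hcond' : ¬ pvRankOf (dA.getD k []) ≤ pvRankOf up := hbest ▸ hcond
      rw [hstepA, if_neg hcond']
      refine ⟨hmk ▸ hkeys, hmk ▸ hnd, ?_⟩
      intro k' hk'
      rw [hmk] at hk'
      by_cases hkk : k' = k
      · subst hkk
        rw [hbestnew, if_neg hcond, hBgetD]
        exact ⟨by simp [hg], hbest⟩
      · rw [pvStepB, PySem.Dict.getD_modify_of_ne _ _ _ hkk]
        exact hvals k' hk'
  · -- new key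
    have hkA : k ∉ dA.keys := hkeys ▸ hk
    have hget : dA.get? k = none := (PySem.Dict.get?_eq_none_iff_not_mem_keys dA k).mpr hkA
    have hcB : dB.contains k = false := by
      cases hc : dB.contains k with
      | false => rfl
      | true => exact absurd ((PySem.Dict.contains_iff_mem_keys dB k).mp hc) hk
    have hcA : dA.contains k = false := by
      cases hc : dA.contains k with
      | false => rfl
      | true => exact absurd ((PySem.Dict.contains_iff_mem_keys dA k).mp hc) hkA
    have hstepA : pvStepA dA up = dA.insert k up := by
      rw [pvStepA, ← hkdef, hget]
    have hmk : (pvStepB dB up).keys = dB.keys ++ [k] := by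
      rw [pvStepB, PySem.Dict.keys_modify, PySem.Dict.keys_insert_of_not_contains _ _ hcB]
    have hBgetD : (pvStepB dB up).getD k [] = [up] := by
      have := PySem.Dict.getD_modify_self dB k [] (· ++ [up])
      rw [pvStepB, this, PySem.Dict.getD_of_not_contains dB [] hcB, List.nil_append]
    refine ⟨?_, ?_, ?_⟩
    · rw [hstepA, PySem.Dict.keys_insert_of_not_contains _ _ hcA, hmk, hkeys]
    · rw [hmk]
      refine List.Nodup.append hnd (List.nodup_singleton k) ?_
      intro a ha hb
      rw [List.mem_singleton] at hb
      subst hb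
      exact hk ha
    · intro k' hk'
      rw [hmk] at hk'
      by_cases hkk : k' = k
      · subst hkk
        rw [hBgetD, hstepA, PySem.Dict.getD_insert_self]
        exact ⟨by simp, by simp [pvBest]⟩
      · have hk'' : k' ∈ dB.keys := by
          rcases List.mem_append.mp hk' with h1 | h1
          · exact h1
          · exact absurd (List.mem_singleton.mp h1) hkk
        rw [hstepA, PySem.Dict.getD_insert_of_ne _ _ _ hkk,
          pvStepB, PySem.Dict.getD_modify_of_ne _ _ _ hkk]
        exact hvals k' hk''

theorem rel_foldl (l : List (List (String × String)))
    (dA : PySem.Dict String (List (String × String)))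
    (dB : PySem.Dict String (List (List (String × String))))
    (h : pvRel dA dB) : pvRel (l.foldl pvStepA dA) (l.foldl pvStepB dB) := by
  induction l generalizing dA dB with
  | nil => exact h
  | cons up t ih => exact ih _ _ (rel_step dA dB up h)

theorem foldl_best (items : List (String × List (List (String × String))))
    (acc : List (List (String × String))) :
    items.foldl (fun res p => res ++ [pvBest p.2]) acc
      = acc ++ items.map (fun p => pvBest p.2) := by
  induction items generalizing acc with
  | nil => simp
  | cons p t ih => simp [ih]

-- ===== VERDICT (by name: the statement is the Claim_ definition above) =====
theorem dedupe_updates_py_spec : Claim_equal_dedupe_updates_py := by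
  intro updates _ _
  unfold Spec_dedupe_updates_py
  show (updates.foldl pvStepA PySem.Dict.empty).values
      = ((updates.foldl pvStepB PySem.Dict.empty).items.foldl (fun res p => res ++ [pvBest p.2]) [])
  have hrel : pvRel (updates.foldl pvStepA PySem.Dict.empty) (updates.foldl pvStepB PySem.Dict.empty) := by
    apply rel_foldl
    refine ⟨by simp [PySem.Dict.keys_empty], by simp [PySem.Dict.keys_empty], ?_⟩
    intro k hk
    simp [PySem.Dict.keys_empty] at hk
  obtain ⟨hkeys, hnd, hvals⟩ := hrel
  set dA := updates.foldl pvStepA PySem.Dict.empty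
  set dB := updates.foldl pvStepB PySem.Dict.empty
  rw [foldl_best, List.nil_append,
    PySem.Dict.items_eq_map_keys dB hnd [],
    PySem.Dict.values_eq_map_keys dA (hkeys ▸ hnd) [],
    List.map_map, hkeys]
  apply List.map_congr_left
  intro k hk
  exact (hvals k hk).2
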